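-- pv_equiv track=rewrite | github.com/Evangeline0401/AF-CFR | cfr_axu.py | create_info_set
-- ===== SOURCE A (Python) =====
-- import copy
--
-- def create_info_set(action, chance_action, payoff):
--
--     initial = [ [[]] ]
--     ite_action = [chance_action, action[0], action[1]]
--     for ite in range(3):
--         sample = []
--         for i in initial[-1]:
--             for j in ite_action[ite]:
--                 hoge = copy.copy(i)
--                 hoge.append(j)
--                 sample.append(hoge)
--         if ite != 2:
--             initial.append(sample)
--         # else:
--         #     for k in sample:
--         #         initial.append(k)
--
--     return initial
-- ===== SOURCE B (Python) =====
-- def create_info_set(action, chance_action, payoff):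
--     return [
--         [[]],
--         [[c] for c in chance_action],
--         [[c, a] for c in chance_action for a in action[0]],
--     ]
-- ===== Notes on version B (the rewrite author's own statement) =====
-- stated objective: simpler
-- what changed: B builds the three output levels directly with comprehensions (closed-form Cartesian products) instead of A's stateful loop that extends the previous level three times and discards the last extension.
import Mathlib
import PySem

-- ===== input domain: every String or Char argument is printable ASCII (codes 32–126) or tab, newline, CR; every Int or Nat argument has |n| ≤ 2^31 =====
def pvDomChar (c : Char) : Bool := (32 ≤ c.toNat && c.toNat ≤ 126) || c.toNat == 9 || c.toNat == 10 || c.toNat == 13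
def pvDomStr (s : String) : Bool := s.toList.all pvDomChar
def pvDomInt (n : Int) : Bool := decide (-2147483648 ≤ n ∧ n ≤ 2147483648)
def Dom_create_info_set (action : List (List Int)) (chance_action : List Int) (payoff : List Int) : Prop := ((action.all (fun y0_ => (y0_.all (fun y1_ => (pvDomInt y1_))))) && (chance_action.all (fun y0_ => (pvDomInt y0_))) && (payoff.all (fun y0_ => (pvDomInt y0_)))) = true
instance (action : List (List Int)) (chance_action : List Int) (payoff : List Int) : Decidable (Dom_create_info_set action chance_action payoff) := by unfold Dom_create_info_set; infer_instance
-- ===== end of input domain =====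

-- B builds the three output levels directly with comprehensions instead of A's
-- stateful loop extending the previous level (and discarding the last extension).
-- Return-value equivalence only; neither version mutates its arguments.

-- ===== PORT A =====
-- A's loop: initial starts as [[[]]]; for ite in 0,1,2 extend initial[-1] by every
-- element of ite_action[ite]; append the result unless ite = 2 (then it is discarded).
def create_info_set (action : List (List Int)) (chance_action : List Int) (payoff : List Int) : List (List (List Int)) :=
  match action with
  | a0 :: a1 :: _ =>
    let ite_action : List (List Int) := [chance_action, a0, a1]
    (List.range 3).foldl (fun initial ite =>
      let last := (PySem.List.pyGet? initial (-1)).getD []   -- initial is never empty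
      let sample := last.foldl (fun s i =>
        ((PySem.List.pyGet? ite_action (ite : Int)).getD []).foldl (fun s j =>
          s ++ [i ++ [j]]) s) []
      if ite ≠ 2 then initial ++ [sample] else initial) [[[]]]
  | _ => []   -- Python raises IndexError here (excluded by Pre_)

-- ===== PORT B =====
def create_info_set_alt (action : List (List Int)) (chance_action : List Int) (payoff : List Int) : List (List (List Int)) :=
  match action with
  | a0 :: _ =>
    [ [[]],
      chance_action.map (fun c => [c]),
      chance_action.flatMap (fun c => a0.map (fun a => [c, a])) ]
  | [] => []   -- Python raises IndexError here (excluded by Pre_)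

-- ===== PRECONDITION & SPEC =====
-- Pre_ excludes exactly the inputs where A raises IndexError (action shorter than 2).
def Pre_create_info_set (action : List (List Int)) (chance_action : List Int) (payoff : List Int) : Prop := 2 ≤ action.length
instance (action : List (List Int)) (chance_action : List Int) (payoff : List Int) : Decidable (Pre_create_info_set action chance_action payoff) := by unfold Pre_create_info_set; infer_instance
def pvWitness_create_info_set : List (List Int) × List Int × List Int := ([[1, 2], [3]], [0, 1], [5])

def Spec_create_info_set (action : List (List Int)) (chance_action : List Int) (payoff : List Int) (out : List (List (List Int))) : Prop := out = create_info_set_alt action chance_action payoff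
instance (action : List (List Int)) (chance_action : List Int) (payoff : List Int) (out : List (List (List Int))) : Decidable (Spec_create_info_set action chance_action payoff out) := by unfold Spec_create_info_set; infer_instance

-- ===== CLAIM (what is proved, stated in full; the proofs are below) =====
def Claim_equal_create_info_set : Prop := ∀ (action : List (List Int)) (chance_action : List Int) (payoff : List Int), Dom_create_info_set action chance_action payoff → Pre_create_info_set action chance_action payoff → Spec_create_info_set action chance_action payoff (create_info_set action chance_action payoff)

-- ===== LEMMAS AND PROOFS =====

-- flattening a list of singletons is a map.
theorem flatten_map_singleton {α β : Type} (l : List α) (f : α → β) :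
    (l.map (fun x => [f x])).flatten = l.map f := by
  induction l with
  | nil => rfl
  | cons x xs ih => simp [ih]

-- ===== VERDICT (by name: the statement is the Claim_ definition above) =====
theorem create_info_set_spec : Claim_equal_create_info_set := by
  intro action chance_action payoff _ hpre
  match action with
  | a0 :: a1 :: rest =>
    show create_info_set (a0 :: a1 :: rest) chance_action payoff
        = create_info_set_alt (a0 :: a1 :: rest) chance_action payoff
    simp [create_info_set, create_info_set_alt, List.range_succ,
      PySem.List.pyGet?, PySem.List.pyIdx?,
      flatten_map_singleton, Function.comp_def, List.flatMap_def]
  | [_] => exact absurd hpre (by simp [Pre_create_info_set])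
  | [] => exact absurd hpre (by simp [Pre_create_info_set])
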